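-- pv_equiv track=rewrite | github.com/dpatel76/SynapseDTE2 | tests/comprehensive_test_system.py | prepare_test_path
-- ===== SOURCE A (Python) =====
-- def prepare_test_path(path: str) -> str:
--     """Replace path parameters with test values"""
--     # Replace common parameters
--     replacements = {
--         "{user_id}": "1",
--         "{cycle_id}": "1",
--         "{report_id}": "1",
--         "{attribute_id}": "1",
--         "{test_case_id}": "1",
--         "{observation_id}": "1"
--     }
--
--     for param, value in replacements.items():
--         path = path.replace(param, value)
--
--     return path
-- ===== SOURCE B (Python) =====
-- import re
--
-- _PLACEHOLDER_RE = re.compile(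
--     r"\{(?:user_id|cycle_id|report_id|attribute_id|test_case_id|observation_id)\}"
-- )
--
-- def prepare_test_path(path: str) -> str:
--     """Replace path parameters with test values"""
--     return _PLACEHOLDER_RE.sub("1", path)
-- ===== Notes on version B (the rewrite author's own statement) =====
-- stated objective: idiomatic
-- what changed: Six sequential whole-string str.replace passes over a dict are replaced by one precompiled regex alternation that rewrites every placeholder to '1' in a single left-to-right scan.
import Mathlib
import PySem

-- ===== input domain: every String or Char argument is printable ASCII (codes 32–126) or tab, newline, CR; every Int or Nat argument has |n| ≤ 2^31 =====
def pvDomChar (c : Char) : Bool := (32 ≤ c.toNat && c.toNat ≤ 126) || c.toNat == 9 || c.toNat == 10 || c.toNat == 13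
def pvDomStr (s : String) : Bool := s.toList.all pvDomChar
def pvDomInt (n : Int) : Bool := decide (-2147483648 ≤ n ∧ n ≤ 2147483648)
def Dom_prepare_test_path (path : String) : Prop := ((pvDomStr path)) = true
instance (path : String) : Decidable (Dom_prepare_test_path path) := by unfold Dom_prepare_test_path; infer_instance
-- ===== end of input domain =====

-- B replaces A's six sequential str.replace passes with one precompiled regex
-- alternation doing a single left-to-right scan (objective: idiomatic).


-- ===== PORT A =====
def prepare_test_path (path : String) : String :=
  let replacements : PySem.Dict String String :=
    ((((((PySem.Dict.empty.insert "{user_id}" "1").insert "{cycle_id}" "1").insert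
        "{report_id}" "1").insert "{attribute_id}" "1").insert
        "{test_case_id}" "1").insert "{observation_id}" "1")
  replacements.items.foldl (fun p kv => PySem.Str.replace p kv.1 kv.2) path

-- ===== PORT B =====
-- the six alternatives of the compiled regex, in pattern order
def pvToks : List (List Char) :=
  ["{user_id}".toList, "{cycle_id}".toList, "{report_id}".toList,
   "{attribute_id}".toList, "{test_case_id}".toList, "{observation_id}".toList]

-- re.sub: one left-to-right scan; at each position try the alternatives in
-- order, emit '1' and jump past the match, else copy the character
def pvScan (ts : List (List Char)) : List Char → List Char
  | [] => []
  | c :: s =>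
    match ts.find? (fun t => t.isPrefixOf (c :: s)) with
    | some t => '1' :: pvScan ts (s.drop (t.length - 1))
    | none => c :: pvScan ts s
termination_by s => s.length
decreasing_by all_goals simp

def prepare_test_path_alt (path : String) : String :=
  String.ofList (pvScan pvToks path.toList)

-- ===== PRECONDITION & SPEC =====
def Spec_prepare_test_path (path : String) (out : String) : Prop := out = prepare_test_path_alt path
instance (path : String) (out : String) : Decidable (Spec_prepare_test_path path out) := by unfold Spec_prepare_test_path; infer_instance

-- ===== CLAIM (what is proved, stated in full; the proofs are below) =====
def Claim_equal_prepare_test_path : Prop := ∀ (path : String), Dom_prepare_test_path path → Spec_prepare_test_path path (prepare_test_path path)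

-- ===== LEMMAS AND PROOFS =====

-- clean (fuel-free) form of one str.replace pass with a non-empty needle
def pvRepl (o new : List Char) : List Char → List Char
  | [] => []
  | c :: t =>
    if o.isPrefixOf (c :: t) then new ++ pvRepl o new (t.drop (o.length - 1))
    else c :: pvRepl o new t
termination_by s => s.length
decreasing_by all_goals simp

lemma pv_go_eq (o new : List Char) (ho : o ≠ []) :
    ∀ (fuel : Nat) (l acc : List Char), l.length ≤ fuel →
      PySem.Chars.replace.go o new fuel l acc = acc.reverse ++ pvRepl o new l := by
  intro fuel
  induction fuel with
  | zero =>
    intro l acc h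
    have : l = [] := by cases l <;> simp_all
    subst this; simp [PySem.Chars.replace.go, pvRepl]
  | succ n ih =>
    intro l acc h
    cases l with
    | nil => simp [PySem.Chars.replace.go, pvRepl]
    | cons c t =>
      have holen : 1 ≤ o.length := by cases o <;> simp_all
      by_cases hp : o.isPrefixOf (c :: t)
      · have hdrop : List.drop o.length (c :: t) = t.drop (o.length - 1) := by
          cases o with
          | nil => simp_all
          | cons a o' => simp
        have hle : (List.drop o.length (c :: t)).length ≤ n := by
          simp at h ⊢; omega
        rw [PySem.Chars.replace.go, if_pos hp, ih _ _ hle, hdrop, pvRepl, if_pos hp]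
        simp
      · have hle : t.length ≤ n := by simp at h; omega
        rw [PySem.Chars.replace.go, if_neg hp, ih _ _ hle, pvRepl, if_neg hp]
        simp

lemma pv_replace_eq (o new s : List Char) (ho : o ≠ []) :
    PySem.Chars.replace s o new = pvRepl o new s := by
  rw [PySem.Chars.replace, if_neg (by simpa using ho), pv_go_eq o new ho s.length s [] le_rfl]
  simp

-- the empty alternation copies the string
lemma pvScan_nil : ∀ s, pvScan [] s = s := by
  intro s
  induction s with
  | nil => simp [pvScan]
  | cons c t ih => simp [pvScan, ih]

-- prefix preservation: up to any point, the scan either has not rewritten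
-- anything yet or has already emitted a '1'
lemma pvScan_take (ts : List (List Char)) :
    ∀ (s : List Char) (n : Nat),
      (pvScan ts s).take n = s.take n ∨ '1' ∈ (pvScan ts s).take n := by
  intro s
  induction s with
  | nil => intro n; left; simp [pvScan]
  | cons c t ih =>
    intro n
    cases n with
    | zero => left; simp
    | succ m =>
      rw [pvScan]
      cases hf : ts.find? (fun u => u.isPrefixOf (c :: t)) with
      | some u => right; simp
      | none =>
        rcases ih m with h | h
        · left; simp [h]
        · right; simp [h]

-- if no alternative matches at the first n positions, the scan copies them
lemma pvScan_skip (ts : List (List Char)) :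
    ∀ (n : Nat) (s : List Char),
      (∀ j < n, ∀ u ∈ ts, ¬ u.isPrefixOf (s.drop j)) →
      pvScan ts s = s.take n ++ pvScan ts (s.drop n) := by
  intro n
  induction n with
  | zero => intro s _; simp
  | succ m ih =>
    intro s hno
    cases s with
    | nil => simp [pvScan]
    | cons c t =>
      have h0 : ts.find? (fun u => u.isPrefixOf (c :: t)) = none := by
        rw [List.find?_eq_none]
        intro u hu
        simpa using hno 0 (by omega) u hu
      rw [pvScan, h0]
      have := ih t (fun j hj u hu => by
        have := hno (j + 1) (by omega) u hu
        simpa using this)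
      simp [this]

lemma pv_head_not_prefix {u l : List Char} {x : Char}
    (hu : u.head? = some '{') (hl : l.head? = some x) (hx : x ≠ '{') :
    ¬ u.isPrefixOf l := by
  cases u with
  | nil => simp at hu
  | cons a u' =>
    cases l with
    | nil => simp
    | cons b l' =>
      simp at hu hl
      subst hu hl
      simp [List.isPrefixOf]
      intro h; exact absurd h.symm hx

-- MAIN: one more replace pass over the scan result = the scan with the extra
-- alternative appended (replacement '1' never creates or destroys a match)
lemma pv_main (t : List Char) (h1 : '1' ∉ t) (hh : t.head? = some '{')
    (htl : '{' ∉ t.tail) (ts : List (List Char))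
    (hts : ∀ u ∈ ts, u.head? = some '{') :
    ∀ (n : Nat) (s : List Char), s.length ≤ n →
      pvRepl t ['1'] (pvScan ts s) = pvScan (ts ++ [t]) s := by
  obtain ⟨t', rfl⟩ : ∃ t', t = '{' :: t' := by
    cases t with
    | nil => simp at hh
    | cons a t' => simp at hh; subst hh; exact ⟨t', rfl⟩
  simp only [List.tail_cons] at htl
  intro n
  induction n with
  | zero =>
    intro s hs
    have : s = [] := by cases s <;> simp_all
    subst this; simp [pvScan, pvRepl]
  | succ m ih =>
    intro s hs
    cases s with
    | nil => simp [pvScan, pvRepl]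
    | cons c s₀ =>
      cases hf : ts.find? (fun u => u.isPrefixOf (c :: s₀)) with
      | some u =>
        -- an earlier alternative matches here: both sides emit '1' and jump
        have hflat : (ts ++ [('{' :: t')]).find? (fun u => u.isPrefixOf (c :: s₀)) = some u := by
          rw [List.find?_append, hf]; rfl
        rw [pvScan, hf, pvScan, hflat, pvRepl]
        rw [if_neg (by simp [List.isPrefixOf])]
        congr 1
        exact ih _ (by simp at hs ⊢; omega)
      | none =>
        by_cases hp : (('{' :: t') : List Char).isPrefixOf (c :: s₀)
        · -- the new alternative matches here
          have hpre : (('{' :: t') : List Char) <+: (c :: s₀) := by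
            simpa [List.isPrefixOf_iff_prefix] using hp
          obtain ⟨r, hr⟩ := hpre
          have hc : c :: s₀ = '{' :: (t' ++ r) := by rw [← hr]; simp
          -- no earlier alternative matches anywhere inside the new match
          have hskip : ∀ j < ('{' :: t').length, ∀ u ∈ ts,
              ¬ u.isPrefixOf ((c :: s₀).drop j) := by
            intro j hj u hu
            cases j with
            | zero =>
              simp only [List.drop_zero]
              have := List.find?_eq_none.mp hf u hu
              simpa using this
            | succ i =>
              have hi : i < t'.length := by simp at hj; omega
              have hhd : ((c :: s₀).drop (i + 1)).head? = some (t'[i]) := by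
                rw [hc, List.drop_succ_cons, List.head?_drop,
                  List.getElem?_append_left hi, List.getElem?_eq_getElem hi]
              exact pv_head_not_prefix (hts u hu) hhd
                (fun he => htl (he ▸ List.getElem_mem hi))
          have hcopy := pvScan_skip ts (('{' :: t').length) (c :: s₀) hskip
          have htake : (c :: s₀).take (('{' :: t').length) = '{' :: t' := by
            rw [← hr]; exact List.take_left' rfl
          have hdropr : (c :: s₀).drop (('{' :: t').length) = r := by
            rw [← hr]; exact List.drop_left
          rw [hcopy, htake, hdropr]
          -- left side: pvRepl consumes the literal copy of the token
          have hlhs : pvRepl ('{' :: t') ['1'] (('{' :: t') ++ pvScan ts r)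
              = '1' :: pvRepl ('{' :: t') ['1'] (pvScan ts r) := by
            rw [show (('{' :: t') ++ pvScan ts r) = '{' :: (t' ++ pvScan ts r) by simp]
            rw [pvRepl, if_pos (by
              rw [List.isPrefixOf_iff_prefix]
              exact ⟨pvScan ts r, by simp⟩)]
            simp
          rw [hlhs]
          -- right side: the appended alternative fires
          have hfnd : (ts ++ [('{' :: t')]).find? (fun u => u.isPrefixOf (c :: s₀))
              = some ('{' :: t') := by
            rw [List.find?_append, hf]
            simp [hp]
          have hdrop2 : s₀.drop t'.length = r := by simpa using hdropr
          have hRHS : pvScan (ts ++ [('{' :: t')]) (c :: s₀)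
              = '1' :: pvScan (ts ++ [('{' :: t')]) r := by
            rw [pvScan, hfnd]
            simp [hdrop2]
          rw [hRHS]
          congr 1
          refine ih _ ?_
          have hlenr : (('{' :: t') ++ r).length = (c :: s₀).length := by rw [hr]
          simp at hs hlenr ⊢; omega
        · -- nothing matches here: both sides copy c
          have hfnone : (ts ++ [('{' :: t')]).find? (fun u => u.isPrefixOf (c :: s₀)) = none := by
            rw [List.find?_append, hf]
            simp [hp]
          have hRHS : pvScan (ts ++ [('{' :: t')]) (c :: s₀)
              = c :: pvScan (ts ++ [('{' :: t')]) s₀ := by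
            rw [pvScan, hfnone]
          have hnm : ¬ ((('{' :: t') : List Char).isPrefixOf (c :: pvScan ts s₀) = true) := by
            -- a match of the token on the scanned output would imply one on the input
            intro habs
            rw [List.isPrefixOf_iff_prefix, List.cons_prefix_cons] at habs
            obtain ⟨rfl, ht'pre⟩ := habs
            have htake' : (pvScan ts s₀).take t'.length = t' :=
              (List.prefix_iff_eq_take.mp ht'pre).symm
            rcases pvScan_take ts s₀ t'.length with hq | hq
            · apply hp
              rw [List.isPrefixOf_iff_prefix, List.cons_prefix_cons]
              refine ⟨rfl, ?_⟩
              have ht'eq : t' = s₀.take t'.length := htake'.symm.trans hq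
              have hpre2 := List.take_prefix t'.length s₀
              rwa [← ht'eq] at hpre2
            · rw [htake'] at hq
              exact h1 (List.mem_cons_of_mem _ hq)
          rw [pvScan, hf, hRHS, pvRepl, if_neg hnm]
          congr 1
          exact ih s₀ (by simp at hs; omega)

-- the six replace passes of A, in dict order, equal B's one scan
lemma pv_fold_eq (s : List Char) :
    pvRepl "{observation_id}".toList ['1'] (pvRepl "{test_case_id}".toList ['1']
      (pvRepl "{attribute_id}".toList ['1'] (pvRepl "{report_id}".toList ['1']
        (pvRepl "{cycle_id}".toList ['1'] (pvRepl "{user_id}".toList ['1'] s)))))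
    = pvScan pvToks s := by
  have step : ∀ (t : List Char), '1' ∉ t → t.head? = some '{' → '{' ∉ t.tail →
      ∀ (ts : List (List Char)), (∀ u ∈ ts, u.head? = some '{') →
      ∀ s, pvRepl t ['1'] (pvScan ts s) = pvScan (ts ++ [t]) s :=
    fun t h1 hh htl ts hts s => pv_main t h1 hh htl ts hts s.length s le_rfl
  conv_lhs => rw [show s = pvScan [] s from (pvScan_nil s).symm]
  rw [step "{user_id}".toList (by decide) (by decide) (by decide) [] (by decide),
    step "{cycle_id}".toList (by decide) (by decide) (by decide) _ (by decide),
    step "{report_id}".toList (by decide) (by decide) (by decide) _ (by decide),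
    step "{attribute_id}".toList (by decide) (by decide) (by decide) _ (by decide),
    step "{test_case_id}".toList (by decide) (by decide) (by decide) _ (by decide),
    step "{observation_id}".toList (by decide) (by decide) (by decide) _ (by decide)]
  rfl

-- ===== VERDICT (by name: the statement is the Claim_ definition above) =====
theorem prepare_test_path_spec : Claim_equal_prepare_test_path := by
  intro path _
  show prepare_test_path path = prepare_test_path_alt path
  have hitems :
      (((((((PySem.Dict.empty.insert "{user_id}" "1").insert "{cycle_id}" "1").insert
        "{report_id}" "1").insert "{attribute_id}" "1").insert
        "{test_case_id}" "1").insert "{observation_id}" "1") : PySem.Dict String String).items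
      = [("{user_id}", "1"), ("{cycle_id}", "1"), ("{report_id}", "1"),
         ("{attribute_id}", "1"), ("{test_case_id}", "1"), ("{observation_id}", "1")] := by
    decide
  rw [prepare_test_path, hitems]
  simp only [List.foldl_cons, List.foldl_nil]
  simp only [PySem.Str.replace, String.toList_ofList]
  rw [pv_replace_eq _ _ _ (by decide), pv_replace_eq _ _ _ (by decide),
      pv_replace_eq _ _ _ (by decide), pv_replace_eq _ _ _ (by decide),
      pv_replace_eq _ _ _ (by decide), pv_replace_eq _ _ _ (by decide)]
  rw [prepare_test_path_alt]
  congr 1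
  exact pv_fold_eq path.toList
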